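-- pv_equiv track=rewrite | github.com/datacommonsorg/data | scripts/us_census/acs5yr/subject_tables/common/helper_functions.py | replace_first_token_in_column
-- ===== SOURCE A (Python) =====
-- def replace_first_token_in_column(cur_column: str,
--                                   old_token: str,
--                                   new_token: str,
--                                   delimiter: str = '!!') -> str:
--     new_list = []
--     temp_flag = True
--     for x in cur_column.split(delimiter):
--         if x == old_token and temp_flag:
--             new_list.append(new_token)
--             temp_flag = False
--         else:
--             new_list.append(x)
--
--     return delimiter.join(new_list)
-- ===== SOURCE B (Python) =====
-- def replace_first_token_in_column(cur_column: str,
--                                   old_token: str,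
--                                   new_token: str,
--                                   delimiter: str = '!!') -> str:
--     head, sep, tail = cur_column.partition(delimiter)
--     if head == old_token:
--         return new_token + sep + tail
--     if not sep:
--         return cur_column
--     return head + sep + replace_first_token_in_column(tail, old_token, new_token, delimiter)
-- ===== Notes on version B (the rewrite author's own statement) =====
-- stated objective: alternative
-- what changed: B never builds a token list: it recurses over the raw string with str.partition, checking the segment before the first delimiter occurrence and splicing in new_token at the first match, instead of A's split / flagged rebuild loop / join.
import Mathlib
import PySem

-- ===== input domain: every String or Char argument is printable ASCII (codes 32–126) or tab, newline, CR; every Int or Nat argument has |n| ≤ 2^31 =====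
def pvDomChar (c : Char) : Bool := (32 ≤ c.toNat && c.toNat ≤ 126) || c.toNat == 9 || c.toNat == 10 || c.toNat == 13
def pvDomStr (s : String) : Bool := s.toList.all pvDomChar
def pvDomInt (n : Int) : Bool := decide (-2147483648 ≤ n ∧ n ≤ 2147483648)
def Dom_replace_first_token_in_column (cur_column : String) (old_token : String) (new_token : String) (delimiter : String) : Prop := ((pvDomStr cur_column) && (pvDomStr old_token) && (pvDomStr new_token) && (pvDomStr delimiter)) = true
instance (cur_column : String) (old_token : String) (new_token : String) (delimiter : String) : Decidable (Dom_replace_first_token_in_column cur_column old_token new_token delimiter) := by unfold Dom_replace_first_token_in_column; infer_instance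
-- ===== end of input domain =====

-- B replaces A's split / flagged rebuild loop / join with a direct recursion over the raw
-- string via str.partition: no token list is ever built.

-- ===== PORT A =====
-- A's for-loop over cur_column.split(delimiter) with the (new_list, temp_flag) state,
-- as the obvious structural recursion producing new_list (at the List Char level:
-- Str.split?/Str.join are exactly Chars.split?/Chars.join through toList).
def pvLoopA (old_token new_token : List Char) : List (List Char) → Bool → List (List Char)
  | [], _ => []
  | x :: xs, temp_flag =>
      if x == old_token && temp_flag then
        new_token :: pvLoopA old_token new_token xs false
      else
        x :: pvLoopA old_token new_token xs temp_flag

def replace_first_token_in_column (cur_column : String) (old_token : String) (new_token : String) (delimiter : String) : String :=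
  match PySem.Chars.split? cur_column.toList delimiter.toList with   -- none only for delimiter = "" (ValueError, outside Pre_)
  | some tokens => String.ofList (PySem.Chars.join delimiter.toList (pvLoopA old_token.toList new_token.toList tokens true))
  | none => ""

-- ===== PORT B =====
-- Source B's body: head, sep, tail = cur.partition(delim); partition is 'find the leftmost
-- occurrence' (PySem.Chars.find), head/tail are the pieces before/after it; when find
-- misses, head = cur and sep = tail = '', so 'new + sep + tail' is just new and
-- 'if not sep: return cur' fires.  sep ≠ [] is carried for termination (partition('')
-- raises ValueError in Python, outside Pre_).
def pvPartB (old_token new_token sep : List Char) (hsep : sep ≠ []) (cur : List Char) : List Char :=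
    if hi : PySem.Chars.find cur sep = -1 then
      if cur == old_token then new_token else cur
    else
      if cur.take (PySem.Chars.find cur sep).toNat == old_token then
        new_token ++ sep ++ cur.drop ((PySem.Chars.find cur sep).toNat + sep.length)
      else
        cur.take (PySem.Chars.find cur sep).toNat ++ sep ++
          pvPartB old_token new_token sep hsep (cur.drop ((PySem.Chars.find cur sep).toNat + sep.length))
  termination_by cur.length
  decreasing_by
    have h0 : 0 ≤ PySem.Chars.find cur sep := by
      have := PySem.Chars.neg_one_le_find cur sep; omega
    have hinf : sep <:+: cur := (PySem.Chars.find_nonneg_iff cur sep).mp h0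
    have hlen : sep.length ≤ cur.length := hinf.length_le
    have hpos : 0 < sep.length := List.length_pos_iff.mpr hsep
    simp only [List.length_drop]
    omega

def replace_first_token_in_column_alt (cur_column : String) (old_token : String) (new_token : String) (delimiter : String) : String :=
  if h : delimiter.toList = [] then ""   -- partition('') raises ValueError, outside Pre_
  else String.ofList (pvPartB old_token.toList new_token.toList delimiter.toList h cur_column.toList)

-- ===== PRECONDITION & SPEC =====
-- Pre_ excludes only delimiter = "": there Python raises ValueError in both A (str.split) and B (str.partition).
def Pre_replace_first_token_in_column (cur_column : String) (old_token : String) (new_token : String) (delimiter : String) : Prop := delimiter ≠ ""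
instance (cur_column : String) (old_token : String) (new_token : String) (delimiter : String) : Decidable (Pre_replace_first_token_in_column cur_column old_token new_token delimiter) := by unfold Pre_replace_first_token_in_column; infer_instance
def pvWitness_replace_first_token_in_column : String × String × String × String := ("a!!b!!a", "a", "X", "!!")

def Spec_replace_first_token_in_column (cur_column : String) (old_token : String) (new_token : String) (delimiter : String) (out : String) : Prop := out = replace_first_token_in_column_alt cur_column old_token new_token delimiter
instance (cur_column : String) (old_token : String) (new_token : String) (delimiter : String) (out : String) : Decidable (Spec_replace_first_token_in_column cur_column old_token new_token delimiter out) := by unfold Spec_replace_first_token_in_column; infer_instance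

-- ===== CLAIM (what is proved, stated in full; the proofs are below) =====
def Claim_equal_replace_first_token_in_column : Prop := ∀ (cur_column : String) (old_token : String) (new_token : String) (delimiter : String), Dom_replace_first_token_in_column cur_column old_token new_token delimiter → Pre_replace_first_token_in_column cur_column old_token new_token delimiter → Spec_replace_first_token_in_column cur_column old_token new_token delimiter (replace_first_token_in_column cur_column old_token new_token delimiter)

-- ===== LEMMAS AND PROOFS =====

-- apply f to the head of a list only
def pvMapHead (f : List Char → List Char) : List (List Char) → List (List Char)
  | [] => []
  | a :: as => f a :: as

-- reference splitter in 'partition' style: peel the leftmost separator occurrence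
def pvSplit (sep : List Char) (hsep : sep ≠ []) : List Char → List (List Char)
  | [] => [[]]
  | c :: rest =>
    if sep.isPrefixOf (c :: rest) then
      [] :: pvSplit sep hsep (List.drop sep.length (c :: rest))
    else
      pvMapHead (c :: ·) (pvSplit sep hsep rest)
  termination_by l => l.length
  decreasing_by
    · have hpos : 0 < sep.length := List.length_pos_iff.mpr hsep
      simp only [List.length_drop]
      simp only [List.length_cons]
      omega
    · simp

lemma pvMapHead_comp (f g : List Char → List Char) (xs : List (List Char)) :
    pvMapHead f (pvMapHead g xs) = pvMapHead (fun t => f (g t)) xs := by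
  cases xs <;> simp [pvMapHead]

lemma pvMapHead_id (xs : List (List Char)) :
    pvMapHead (fun t => t) xs = xs := by
  cases xs <;> simp [pvMapHead]

lemma pvSplit_ne_nil (sep : List Char) (hsep : sep ≠ []) (l : List Char) :
    pvSplit sep hsep l ≠ [] := by
  induction l using pvSplit.induct sep hsep with
  | case1 => simp [pvSplit]
  | case2 c rest hp ih => simp only [pvSplit, if_pos hp]; simp
  | case3 c rest hp ih =>
      simp only [pvSplit, if_neg hp]
      cases h : pvSplit sep hsep rest with
      | nil => exact absurd h ih
      | cons y ys => simp [pvMapHead]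

-- PySem's fueled splitOn computes exactly pvSplit
lemma splitOn_go_eq (sep : List Char) (hsep : sep ≠ []) :
    ∀ (fuel : Nat) (l cur : List Char) (acc : List (List Char)), l.length ≤ fuel →
      PySem.Chars.splitOn.go sep fuel l cur acc
        = acc.reverse ++ pvMapHead (fun t => cur.reverse ++ t) (pvSplit sep hsep l) := by
  intro fuel
  induction fuel with
  | zero =>
      intro l cur acc hl
      have : l = [] := List.eq_nil_of_length_eq_zero (Nat.le_zero.mp hl)
      subst this
      simp [PySem.Chars.splitOn.go, pvSplit, pvMapHead]
  | succ fuel ih =>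
      intro l cur acc hl
      cases l with
      | nil => simp [PySem.Chars.splitOn.go, pvSplit, pvMapHead]
      | cons c rest =>
        rw [PySem.Chars.splitOn.go]
        by_cases hp : sep.isPrefixOf (c :: rest)
        · rw [if_pos hp]
          have hpos : 0 < sep.length := List.length_pos_iff.mpr hsep
          have hlen : (List.drop sep.length (c :: rest)).length ≤ fuel := by
            simp only [List.length_drop, List.length_cons]
            simp only [List.length_cons] at hl
            omega
          rw [ih _ _ _ hlen]
          simp only [pvSplit, if_pos hp]
          simp only [pvMapHead, List.reverse_nil, List.nil_append, List.append_nil,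
            List.reverse_cons, List.append_assoc, List.singleton_append]
          cases pvSplit sep hsep (List.drop sep.length (c :: rest)) <;> simp
        · rw [if_neg hp]
          have hlen : rest.length ≤ fuel := by
            simp only [List.length_cons] at hl; omega
          rw [ih _ _ _ hlen]
          simp only [pvSplit, if_neg hp, pvMapHead_comp]
          cases pvSplit sep hsep rest <;> simp [pvMapHead]

lemma splitOn_eq_pvSplit (sep : List Char) (hsep : sep ≠ []) (l : List Char) :
    PySem.Chars.splitOn l sep = pvSplit sep hsep l := by
  unfold PySem.Chars.splitOn
  rw [splitOn_go_eq sep hsep (l.length + 1) l [] [] (by omega)]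
  simp [pvMapHead_id]

-- infix ↔ some drop has it as a prefix
lemma infix_iff_exists_prefix_drop (sub s : List Char) :
    sub <:+: s ↔ ∃ j, sub <+: s.drop j := by
  rw [← PySem.Chars.isIn_iff_infix, ← PySem.Chars.exists_prefix_drop_iff_isIn]

lemma find_eq_zero_of_prefix (sep l : List Char) (h : sep <+: l) :
    PySem.Chars.find l sep = 0 := by
  have hinf : sep <:+: l := h.isInfix
  have h0 : 0 ≤ PySem.Chars.find l sep := (PySem.Chars.find_nonneg_iff l sep).mpr hinf
  obtain ⟨_, hmin⟩ := PySem.Chars.find_spec h0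
  by_contra hne
  have hlt : 0 < (PySem.Chars.find l sep).toNat := by omega
  exact hmin 0 hlt (by simpa using h)

lemma find_cons (sep : List Char) (c : Char) (rest : List Char)
    (hnp : ¬ sep <+: (c :: rest)) :
    PySem.Chars.find (c :: rest) sep
      = if PySem.Chars.find rest sep = -1 then -1 else PySem.Chars.find rest sep + 1 := by
  by_cases hr : PySem.Chars.find rest sep = -1
  · rw [if_pos hr]
    have hni : ¬ sep <:+: rest := (PySem.Chars.find_eq_neg_one_iff rest sep).mp hr
    rw [PySem.Chars.find_eq_neg_one_iff]
    intro hinf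
    obtain ⟨j, hj⟩ := (infix_iff_exists_prefix_drop sep (c :: rest)).mp hinf
    cases j with
    | zero => exact hnp (by simpa using hj)
    | succ k =>
        exact hni ((infix_iff_exists_prefix_drop sep rest).mpr ⟨k, by simpa using hj⟩)
  · rw [if_neg hr]
    have hj0 : 0 ≤ PySem.Chars.find rest sep := by
      have := PySem.Chars.neg_one_le_find rest sep; omega
    obtain ⟨hjpre, hjmin⟩ := PySem.Chars.find_spec hj0
    set j := PySem.Chars.find rest sep with hjdef
    -- occurrence at j+1 in c :: rest
    have hocc : sep <+: (c :: rest).drop (j.toNat + 1) := by simpa using hjpre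
    have hinf : sep <:+: (c :: rest) :=
      (infix_iff_exists_prefix_drop sep (c :: rest)).mpr ⟨j.toNat + 1, hocc⟩
    have hf0 : 0 ≤ PySem.Chars.find (c :: rest) sep :=
      (PySem.Chars.find_nonneg_iff _ _).mpr hinf
    obtain ⟨hfpre, hfmin⟩ := PySem.Chars.find_spec hf0
    set f := PySem.Chars.find (c :: rest) sep with hfdef
    -- f ≤ j+1 by minimality of f
    have hle : f.toNat ≤ j.toNat + 1 := by
      by_contra hgt
      exact hfmin (j.toNat + 1) (by omega) hocc
    -- f ≠ 0 since sep is not a prefix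
    have hf_ne : f.toNat ≠ 0 := by
      intro h0
      apply hnp
      simpa [h0] using hfpre
    -- f ≥ j+1 by minimality of j
    have hge : j.toNat + 1 ≤ f.toNat := by
      by_contra hgt
      obtain ⟨m, hm⟩ : ∃ m, f.toNat = m + 1 := ⟨f.toNat - 1, by omega⟩
      have hpre' : sep <+: rest.drop m := by
        have := hfpre; rw [hm] at this; simpa using this
      exact hjmin m (by omega) hpre'
    omega

lemma pvSplit_eq_find (sep : List Char) (hsep : sep ≠ []) (l : List Char) :
    pvSplit sep hsep l =
      (if PySem.Chars.find l sep = -1 then [l]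
       else l.take (PySem.Chars.find l sep).toNat
              :: pvSplit sep hsep (l.drop ((PySem.Chars.find l sep).toNat + sep.length))) := by
  induction l with
  | nil =>
      have : PySem.Chars.find [] sep = -1 := by
        rw [PySem.Chars.find_eq_neg_one_iff]
        intro h
        exact hsep (List.eq_nil_of_infix_nil h)
      simp [pvSplit, this]
  | cons c rest ih =>
      by_cases hp : sep.isPrefixOf (c :: rest)
      · have hpre : sep <+: (c :: rest) := List.isPrefixOf_iff_prefix.mp hp
        have hf : PySem.Chars.find (c :: rest) sep = 0 := find_eq_zero_of_prefix sep _ hpre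
        simp only [pvSplit, if_pos hp, hf]
        norm_num
      · have hnp : ¬ sep <+: (c :: rest) := fun h => hp (List.isPrefixOf_iff_prefix.mpr h)
        have hfc := find_cons sep c rest hnp
        by_cases hr : PySem.Chars.find rest sep = -1
        · rw [if_pos hr] at hfc
          simp only [pvSplit, if_neg hp, hfc]
          rw [ih, if_pos hr]
          simp [pvMapHead]
        · rw [if_neg hr] at hfc
          have hj0 : 0 ≤ PySem.Chars.find rest sep := by
            have := PySem.Chars.neg_one_le_find rest sep; omega
          have hne : PySem.Chars.find rest sep + 1 ≠ -1 := by omega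
          have htn : (PySem.Chars.find rest sep + 1).toNat
              = (PySem.Chars.find rest sep).toNat + 1 := by omega
          simp only [pvSplit, if_neg hp, hfc, if_neg hne, htn]
          rw [ih, if_neg hr]
          have harith : (PySem.Chars.find rest sep).toNat + 1 + sep.length
              = ((PySem.Chars.find rest sep).toNat + sep.length) + 1 := by omega
          simp [pvMapHead, harith, List.take_succ_cons, List.drop_succ_cons]

lemma join_pvSplit (sep : List Char) (hsep : sep ≠ []) (l : List Char) :
    PySem.Chars.join sep (pvSplit sep hsep l) = l := by
  induction l using pvSplit.induct sep hsep with
  | case1 => simp [pvSplit, PySem.Chars.join_singleton]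
  | case2 c rest hp ih =>
      simp only [pvSplit, if_pos hp]
      obtain ⟨y, ys, hys⟩ : ∃ y ys, pvSplit sep hsep (List.drop sep.length (c :: rest)) = y :: ys := by
        cases h : pvSplit sep hsep (List.drop sep.length (c :: rest)) with
        | nil => exact absurd h (pvSplit_ne_nil sep hsep _)
        | cons y ys => exact ⟨y, ys, rfl⟩
      rw [hys, PySem.Chars.join_cons_cons, ← hys, ih]
      obtain ⟨t, ht⟩ := List.isPrefixOf_iff_prefix.mp hp
      rw [← ht, List.drop_left]
      simp
  | case3 c rest hp ih =>
      simp only [pvSplit, if_neg hp]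
      cases h : pvSplit sep hsep rest with
      | nil => exact absurd h (pvSplit_ne_nil sep hsep _)
      | cons y ys =>
        rw [h] at ih
        cases ys with
        | nil =>
            simp only [pvMapHead, PySem.Chars.join_singleton] at *
            simp [ih]
        | cons z zs =>
            simp only [pvMapHead]
            rw [PySem.Chars.join_cons_cons]
            rw [PySem.Chars.join_cons_cons] at ih
            simp [← ih]

-- once temp_flag is False the loop copies the rest unchanged
lemma pvLoopA_false (old_token new_token : List Char) :
    ∀ ts : List (List Char), pvLoopA old_token new_token ts false = ts := by
  intro ts
  induction ts with
  | nil => rfl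
  | cons x xs ih => simp [pvLoopA, ih]

lemma pvLoopA_ne_nil (old_token new_token : List Char) (ts : List (List Char)) (b : Bool)
    (h : ts ≠ []) : pvLoopA old_token new_token ts b ≠ [] := by
  cases ts with
  | nil => exact absurd rfl h
  | cons x xs => simp only [pvLoopA]; split <;> simp

lemma join_cons_of_ne_nil (sep p : List Char) (L : List (List Char)) (h : L ≠ []) :
    PySem.Chars.join sep (p :: L) = p ++ sep ++ PySem.Chars.join sep L := by
  cases L with
  | nil => exact absurd rfl h
  | cons y ys => exact PySem.Chars.join_cons_cons sep p y ys

-- B's partition recursion computes A's join-of-flagged-rebuild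
lemma find_nil_eq_neg_one (sep : List Char) (hsep : sep ≠ []) :
    PySem.Chars.find [] sep = -1 := by
  rw [PySem.Chars.find_eq_neg_one_iff]
  intro h
  exact hsep (List.eq_nil_of_infix_nil h)

lemma pvPartB_eq (old_token new_token sep : List Char) (hsep : sep ≠ []) (l : List Char) :
    pvPartB old_token new_token sep hsep l
      = PySem.Chars.join sep (pvLoopA old_token new_token (pvSplit sep hsep l) true) := by
  suffices H : ∀ (n : Nat) (l : List Char), l.length ≤ n →
      pvPartB old_token new_token sep hsep l
        = PySem.Chars.join sep (pvLoopA old_token new_token (pvSplit sep hsep l) true) from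
    H l.length l le_rfl
  intro n
  induction n with
  | zero =>
      intro l hl
      have hnil : l = [] := List.eq_nil_of_length_eq_zero (Nat.le_zero.mp hl)
      subst hnil
      have hi := find_nil_eq_neg_one sep hsep
      rw [pvSplit_eq_find sep hsep, if_pos hi, pvPartB.eq_def]
      simp only [dif_pos hi]
      by_cases h : (([] : List Char) == old_token) = true
      · simp [pvLoopA, h, PySem.Chars.join_singleton]
      · simp [pvLoopA, h, PySem.Chars.join_singleton]
  | succ n ih =>
      intro l hl
      by_cases hi : PySem.Chars.find l sep = -1
      · rw [pvSplit_eq_find sep hsep, if_pos hi, pvPartB.eq_def]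
        simp only [dif_pos hi]
        by_cases h : (l == old_token) = true
        · simp [pvLoopA, h, PySem.Chars.join_singleton]
        · simp [pvLoopA, h, PySem.Chars.join_singleton]
      · have h0 : 0 ≤ PySem.Chars.find l sep := by
          have := PySem.Chars.neg_one_le_find l sep; omega
        have hinf : sep <:+: l := (PySem.Chars.find_nonneg_iff l sep).mp h0
        have hpos : 0 < sep.length := List.length_pos_iff.mpr hsep
        have hlensep : sep.length ≤ l.length := hinf.length_le
        have hrec : (l.drop ((PySem.Chars.find l sep).toNat + sep.length)).length ≤ n := by
          simp only [List.length_drop]; omega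
        rw [pvSplit_eq_find sep hsep, if_neg hi, pvPartB.eq_def]
        simp only [dif_neg hi]
        by_cases h : (l.take (PySem.Chars.find l sep).toNat == old_token) = true
        · rw [if_pos h]
          simp only [pvLoopA, h, Bool.true_and, if_pos, pvLoopA_false]
          rw [join_cons_of_ne_nil sep new_token _ (pvSplit_ne_nil sep hsep _),
            join_pvSplit]
        · rw [if_neg h]
          have hb : (l.take (PySem.Chars.find l sep).toNat == old_token && true) = false := by
            simp only [Bool.and_true]
            exact Bool.not_eq_true _ ▸ (by simpa using h)
          simp only [pvLoopA, hb, Bool.false_eq_true, if_false]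
          rw [ih _ hrec,
            join_cons_of_ne_nil sep _ _
              (pvLoopA_ne_nil old_token new_token _ true (pvSplit_ne_nil sep hsep _))]

-- ===== VERDICT (by name: the statement is the Claim_ definition above) =====
theorem replace_first_token_in_column_spec : Claim_equal_replace_first_token_in_column := by
  intro cur_column old_token new_token delimiter _ hpre
  unfold Spec_replace_first_token_in_column
  unfold replace_first_token_in_column replace_first_token_in_column_alt
  have hd : delimiter.toList ≠ [] := by
    intro h
    exact hpre (String.toList_inj.mp (by simpa using h))
  rw [dif_neg hd]
  have hsplit : PySem.Chars.split? cur_column.toList delimiter.toList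
      = some (PySem.Chars.splitOn cur_column.toList delimiter.toList) := by
    simp [PySem.Chars.split?, List.isEmpty_iff, hd]
  rw [hsplit]
  rw [splitOn_eq_pvSplit delimiter.toList hd, pvPartB_eq]
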